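-- pv_equiv track=rewrite | github.com/lkohlhase/SFAS | generate_data.py | findbestcenterapproach
-- ===== SOURCE A (Python) =====
-- def findbestcenterapproach(binarylist,numclusters,windowsize):
--     '''
--     Alternative way of finding boundaries
--     '''
--     centers=[]
--     for i in range(numclusters):
--
--         bestcenter=0
--         bestcentervalue=0
--         for j in range(len(binarylist)-windowsize):
--             centervalue=binarylist[j:j+windowsize].count(i)
--             if centervalue>bestcentervalue:
--                 bestcentervalue=centervalue
--                 bestcenter=j
--         centers.append((bestcenter,bestcentervalue))
--     return centers
-- ===== SOURCE B (Python) =====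
-- def findbestcenterapproach(binarylist, numclusters, windowsize):
--     '''
--     Three-stage re-implementation: per cluster build a prefix-count array,
--     materialise all window counts by O(1) subtractions, then pick the best
--     start with max()/index() instead of a running-best loop.
--     '''
--     n = len(binarylist)
--
--     def best_for(i):
--         prefix = [0]
--         acc = 0
--         for x in binarylist:
--             acc += (x == i)
--             prefix.append(acc)
--         vals = [prefix[j + windowsize] - prefix[j] for j in range(n - windowsize)]
--         best = max(vals, default=0)
--         return (vals.index(best) if best > 0 else 0, best)
--
--     return [best_for(i) for i in range(numclusters)]
-- ===== Notes on version B (the rewrite author's own statement) =====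
-- stated objective: faster
-- what changed: Per cluster, a prefix-count array turns every window count into one subtraction and the running-best inner loop is replaced by materialising all window counts and selecting the first maximum with max()/index().
-- outside the precondition, e.g. on findbestcenterapproach([0, 1], 2, -1): A returns [(0, 1), (0, 0)], B returns [(0, 1), (0, 1)]
import Mathlib
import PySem

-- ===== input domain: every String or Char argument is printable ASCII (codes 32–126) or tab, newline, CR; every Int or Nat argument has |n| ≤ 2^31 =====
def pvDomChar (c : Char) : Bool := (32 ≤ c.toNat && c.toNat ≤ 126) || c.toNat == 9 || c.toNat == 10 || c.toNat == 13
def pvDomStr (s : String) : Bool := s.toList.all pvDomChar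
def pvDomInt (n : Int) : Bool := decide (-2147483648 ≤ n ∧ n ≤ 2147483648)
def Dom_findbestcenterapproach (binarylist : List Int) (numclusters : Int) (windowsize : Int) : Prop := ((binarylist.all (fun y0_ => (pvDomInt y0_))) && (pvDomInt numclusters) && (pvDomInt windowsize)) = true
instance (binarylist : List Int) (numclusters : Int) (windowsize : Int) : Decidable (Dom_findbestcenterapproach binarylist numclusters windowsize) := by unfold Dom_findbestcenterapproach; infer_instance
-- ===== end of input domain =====

-- ===== PORT A =====
-- B replaces per-window slice recounting by a per-cluster prefix-count array plus a max()/index()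
-- selection of the first best start; proved equal for windowsize ≥ 0.
def findbestcenterapproach (binarylist : List Int) (numclusters : Int) (windowsize : Int) : List (Int × Int) :=
  (PySem.List.pyRange 0 numclusters 1).foldl (fun centers i =>
    let best := (PySem.List.pyRange 0 ((binarylist.length : Int) - windowsize) 1).foldl
      (fun (bc : Int × Int) j =>
        let centervalue : Int :=
          ((PySem.List.slice binarylist (some j) (some (j + windowsize))).count i : Int)
        if centervalue > bc.2 then (j, centervalue) else bc) (0, 0)
    centers ++ [best]) []

-- ===== PORT B =====
def findbestcenterapproach_alt (binarylist : List Int) (numclusters : Int) (windowsize : Int) : List (Int × Int) :=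
  (PySem.List.pyRange 0 numclusters 1).map (fun i =>
    let pref := (binarylist.foldl
      (fun (p : List Int × Int) x =>
        let acc := p.2 + (if x = i then 1 else 0)
        (p.1 ++ [acc], acc)) ([0], 0)).1
    let vals := (PySem.List.pyRange 0 ((binarylist.length : Int) - windowsize) 1).map
      (fun j => PySem.List.pyGetD pref (j + windowsize) 0 - PySem.List.pyGetD pref j 0)
    let best := PySem.List.maxD vals (fun x => x) 0   -- max(vals, default=0)
    (if best > 0 then (((PySem.List.index? vals best).getD 0 : Nat) : Int) else 0, best))

-- ===== PRECONDITION & SPEC =====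
-- Pre_ restricts to the natural domain of nonnegative window sizes (plus the trivial case of no
-- clusters, where the loop body never runs): for windowsize < 0 with clusters present, the Python
-- slice stop in A wraps relative to the end of the list, an accident no caller relies on.
def Pre_findbestcenterapproach (binarylist : List Int) (numclusters : Int) (windowsize : Int) : Prop :=
  0 ≤ windowsize ∨ numclusters ≤ 0
instance (binarylist : List Int) (numclusters : Int) (windowsize : Int) : Decidable (Pre_findbestcenterapproach binarylist numclusters windowsize) := by unfold Pre_findbestcenterapproach; infer_instance

def pvWitness_findbestcenterapproach : List Int × Int × Int := ([0, 1, 0, 1, 1], 2, 2)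

def Spec_findbestcenterapproach (binarylist : List Int) (numclusters : Int) (windowsize : Int) (out : List (Int × Int)) : Prop := out = findbestcenterapproach_alt binarylist numclusters windowsize
instance (binarylist : List Int) (numclusters : Int) (windowsize : Int) (out : List (Int × Int)) : Decidable (Spec_findbestcenterapproach binarylist numclusters windowsize out) := by unfold Spec_findbestcenterapproach; infer_instance

-- ===== CLAIM (what is proved, stated in full; the proofs are below) =====
def Claim_equal_findbestcenterapproach : Prop := ∀ (binarylist : List Int) (numclusters : Int) (windowsize : Int), Dom_findbestcenterapproach binarylist numclusters windowsize → Pre_findbestcenterapproach binarylist numclusters windowsize → Spec_findbestcenterapproach binarylist numclusters windowsize (findbestcenterapproach binarylist numclusters windowsize)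

-- ===== LEMMAS AND PROOFS =====

-- The prefix fold in B produces the list of counts of i in every prefix of l, continuing from state (p0, a).
theorem prefix_fold_spec (l : List Int) (i : Int) (p0 : List Int) (a : Int) :
    l.foldl (fun (p : List Int × Int) x =>
        (p.1 ++ [p.2 + (if x = i then 1 else 0)], p.2 + (if x = i then 1 else 0))) (p0, a)
      = (p0 ++ (List.range l.length).map (fun k => a + ((l.take (k + 1)).count i : Int)),
         a + (l.count i : Int)) := by
  induction l generalizing p0 a with
  | nil => simp
  | cons x t ih =>
    simp only [List.foldl_cons, ih, List.length_cons, List.range_succ_eq_map, List.map_cons,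
      List.map_map, List.take_succ_cons, List.count_cons, Prod.mk.injEq]
    refine ⟨?_, ?_⟩
    · simp only [List.append_assoc, List.singleton_append, List.take_zero, List.count_nil]
      rcases eq_or_ne x i with h | h <;> simp [h, Function.comp] <;> try (intro k _; ring)
    · push_cast; rcases eq_or_ne x i with h | h <;> simp [h] <;> try ring

-- pyGetD on the prefix list at 0 ≤ k ≤ n reads the count of i in the first k elements.
theorem prefix_getD (l : List Int) (i : Int) (k : Int) (hk : 0 ≤ k) (hk2 : k ≤ (l.length : Int)) :
    PySem.List.pyGetD
      ((l.foldl (fun (p : List Int × Int) x =>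
        (p.1 ++ [p.2 + (if x = i then 1 else 0)], p.2 + (if x = i then 1 else 0))) ([0], 0)).1)
      k 0 = ((l.take k.toNat).count i : Int) := by
  rw [prefix_fold_spec]
  dsimp only
  rw [show k = ((k.toNat : Nat) : Int) by omega, PySem.List.pyGetD_natCast]
  rcases hm : k.toNat with _ | m
  · simp
  · have hm' : m < l.length := by omega
    simp [hm', List.getD]

theorem count_slice_eq (l : List Int) (i j w : Int) (hj : 0 ≤ j) (hw : 0 ≤ w)
    (_hjw : j + w ≤ (l.length : Int)) :
    ((PySem.List.slice l (some j) (some (j + w))).count i : Int)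
      = ((l.take (j + w).toNat).count i : Int) - ((l.take j.toNat).count i : Int) := by
  have h1 : (j + w).toNat = j.toNat + w.toNat := by omega
  rw [PySem.List.slice_toNat _ hj (by omega), h1]
  have h2 : j.toNat + w.toNat - j.toNat = w.toNat := by omega
  rw [h2, List.take_add, List.count_append]
  push_cast
  ring

-- max? over a list with one element appended takes one more fold step.
theorem max?_append_singleton_some (l : List Int) (x m : Int)
    (h : PySem.List.max? l (fun y => y) = some m) :
    PySem.List.max? (l ++ [x]) (fun y => y) = if m < x then some x else some m := by
  simp only [PySem.List.max?] at h ⊢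
  rw [List.foldl_append, h]
  rfl

-- A's running-best inner loop over range(n) equals B's max()/index() selection, for
-- nonnegative window values v.
theorem inner_argmax (v : Int → Int) (n : Nat) (hv : ∀ k : Int, 0 ≤ k → k < (n : Int) → 0 ≤ v k) :
    (PySem.List.pyRange 0 (n : Int) 1).foldl
      (fun (bc : Int × Int) j => if v j > bc.2 then (j, v j) else bc) (0, 0)
    = (if PySem.List.maxD ((PySem.List.pyRange 0 (n : Int) 1).map v) (fun x => x) 0 > 0
       then (((PySem.List.index? ((PySem.List.pyRange 0 (n : Int) 1).map v)
                (PySem.List.maxD ((PySem.List.pyRange 0 (n : Int) 1).map v) (fun x => x) 0)).getD 0 : Nat) : Int)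
       else 0,
       PySem.List.maxD ((PySem.List.pyRange 0 (n : Int) 1).map v) (fun x => x) 0) := by
  induction n with
  | zero => simp [PySem.List.pyRange_one_eq_nil, PySem.List.maxD, PySem.List.max?]
  | succ n ih =>
    have hv' : ∀ k : Int, 0 ≤ k → k < (n : Int) → 0 ≤ v k :=
      fun k h1 h2 => hv k h1 (by push_cast; omega)
    have hsplit : PySem.List.pyRange 0 ((n + 1 : Nat) : Int) 1
        = PySem.List.pyRange 0 (n : Int) 1 ++ [(n : Int)] := by
      push_cast
      exact PySem.List.pyRange_one_succ_right (by positivity)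
    rw [hsplit, List.foldl_append, ih hv', List.map_append, List.map_singleton]
    set vals := (PySem.List.pyRange 0 (n : Int) 1).map v with hvals
    have hlen : vals.length = n := by
      simp [hvals, PySem.List.length_pyRange_one]
    have hnonneg : ∀ y ∈ vals, 0 ≤ y := by
      intro y hy
      rw [hvals, List.mem_map] at hy
      obtain ⟨k, hk, rfl⟩ := hy
      rw [PySem.List.mem_pyRange_one] at hk
      exact hv' k hk.1 hk.2
    set b := PySem.List.maxD vals (fun x => x) 0 with hb
    have hb0 : 0 ≤ b := by
      rw [hb, PySem.List.maxD]
      cases hm : PySem.List.max? vals (fun x => x) with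
      | none => simp
      | some m => simpa using hnonneg m (PySem.List.max?_mem hm)
    have hmax : vals = [] ∨ PySem.List.max? vals (fun x => x) = some b := by
      cases hm : PySem.List.max? vals (fun x => x) with
      | none => exact Or.inl ((PySem.List.max?_eq_none_iff _ _).mp hm)
      | some m => right; rw [hb, PySem.List.maxD, hm]; rfl
    simp only [List.foldl_cons, List.foldl_nil]
    rcases hmax with hnil | hsome
    · -- vals = [], hence n = 0 and b = 0
      have hn : n = 0 := by simpa [hnil] using hlen.symm
      subst hn
      have hb' : b = 0 := by simp [hb, hnil, PySem.List.maxD, PySem.List.max?]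
      rcases le_or_gt (v 0) 0 with h0 | h0
      · have h00 : v 0 = 0 := le_antisymm h0 (hv 0 le_rfl (by norm_num))
        simp [hnil, hb', h00, PySem.List.maxD, PySem.List.max?]
      · simp [hnil, hb', h0, PySem.List.maxD, PySem.List.max?, PySem.List.index?, gt_iff_lt]
    · -- vals nonempty, max? vals = some b
      have hle : ∀ y ∈ vals, y ≤ b := fun y hy => PySem.List.max?_isMax hsome y hy
      rcases lt_or_ge b (v (n : Int)) with hlt | hge
      · -- new element strictly beats the old max
        have hmaxD' : PySem.List.maxD (vals ++ [v (n : Int)]) (fun x => x) 0 = v (n : Int) := by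
          rw [PySem.List.maxD, max?_append_singleton_some _ _ _ hsome]
          simp [hlt]
        have hnotmem : v (n : Int) ∉ vals := fun hm => absurd (hle _ hm) (by omega)
        have hidx : PySem.List.index? (vals ++ [v (n : Int)]) (v (n : Int)) = some vals.length :=
          PySem.List.index?_append_singleton_self _ _ hnotmem
        have hpos : (0 : Int) < v (n : Int) := lt_of_le_of_lt hb0 hlt
        rw [hmaxD', hidx]
        simp [hlt, hpos, hlen]
      · -- old max survives
        have hmaxD' : PySem.List.maxD (vals ++ [v (n : Int)]) (fun x => x) 0 = b := by
          rw [PySem.List.maxD, max?_append_singleton_some _ _ _ hsome]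
          simp [not_lt.mpr hge]
        rw [hmaxD']
        rw [if_neg (by omega : ¬ v (n : Int) > b)]
        by_cases hbpos : b > 0
        · have hbm : b ∈ vals := PySem.List.max?_mem hsome
          rw [PySem.List.index?_append_of_mem _ hbm]
        · simp [hbpos]

-- ===== VERDICT (by name: the statement is the Claim_ definition above) =====
theorem findbestcenterapproach_spec : Claim_equal_findbestcenterapproach := by
  intro binarylist numclusters windowsize _hdom hpre
  rcases (id hpre : 0 ≤ windowsize ∨ numclusters ≤ 0) with hw | hnc
  case inr =>
    unfold Spec_findbestcenterapproach findbestcenterapproach findbestcenterapproach_alt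
    rw [PySem.List.pyRange_one_eq_nil hnc]
    rfl
  case inl =>
  unfold Spec_findbestcenterapproach findbestcenterapproach findbestcenterapproach_alt
  rw [PySem.List.foldl_append_singleton_eq_map, List.nil_append]
  apply List.map_congr_left
  intro i _hi
  dsimp only
  set m : Int := (binarylist.length : Int) - windowsize with hm
  rcases le_or_gt m 0 with hm0 | hm0
  · rw [PySem.List.pyRange_one_eq_nil hm0]
    simp [PySem.List.maxD, PySem.List.max?]
  · set vB : Int → Int := fun j =>
      PySem.List.pyGetD
        ((binarylist.foldl (fun (p : List Int × Int) x =>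
            (p.1 ++ [p.2 + (if x = i then 1 else 0)], p.2 + (if x = i then 1 else 0))) ([0], 0)).1)
        (j + windowsize) 0
      - PySem.List.pyGetD
        ((binarylist.foldl (fun (p : List Int × Int) x =>
            (p.1 ++ [p.2 + (if x = i then 1 else 0)], p.2 + (if x = i then 1 else 0))) ([0], 0)).1)
        j 0 with hvB
    have hcount : ∀ j : Int, 0 ≤ j → j < m →
        ((PySem.List.slice binarylist (some j) (some (j + windowsize))).count i : Int) = vB j := by
      intro j h1 h2
      rw [hvB]
      dsimp only
      rw [count_slice_eq binarylist i j windowsize h1 hw (by omega),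
          prefix_getD binarylist i (j + windowsize) (by omega) (by omega),
          prefix_getD binarylist i j h1 (by omega)]
    have hA : (PySem.List.pyRange 0 m 1).foldl
        (fun (bc : Int × Int) j =>
          if ((PySem.List.slice binarylist (some j) (some (j + windowsize))).count i : Int) > bc.2
          then (j, ((PySem.List.slice binarylist (some j) (some (j + windowsize))).count i : Int))
          else bc) (0, 0)
        = (PySem.List.pyRange 0 m 1).foldl
        (fun (bc : Int × Int) j => if vB j > bc.2 then (j, vB j) else bc) (0, 0) := by
      apply PySem.List.foldl_congr_mem
      intro acc j hj
      rw [PySem.List.mem_pyRange_one] at hj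
      rw [hcount j hj.1 hj.2]
    have hmn : m = ((m.toNat : Nat) : Int) := by omega
    rw [hA, hmn]
    rw [inner_argmax vB m.toNat (fun k h1 h2 => by
      rw [← hcount k h1 (by omega)]; positivity)]
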